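-- pv_equiv track=rewrite | github.com/FIA-FPT-Information-Assurance-Club/2024-Technical-Entrance-Test | Misc/Road to rome/solve.py | equation
-- ===== SOURCE A (Python) =====
-- def romanToInt(s):
--     roman_numeral_dict = {"I": 1, "V": 5, "X": 10, "L": 50, "C": 100, "D": 500, "M": 1000}
--     result = 0
--     prev = 0
--     for letter in s:
--         current_value = roman_numeral_dict[letter]
--         if current_value > prev:
--             result += current_value - 2 * prev
--         else:
--             result += current_value
--         prev = current_value
--     return result
--
-- def equation(exp):
--     ans = []
--     roman_numeral_dict = {1: "I", 5: "V", 10: "X"}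
--
--     if '+' in exp:
--         left, right = exp.split(" + ")
--         for num_str in [left, right]:
--             romanLetter = ""
--             for i in range(len(num_str)):
--                 if num_str[i:i+2] == "10":
--                     romanLetter += "X"
--                     i += 1
--                 elif int(num_str[i]) in roman_numeral_dict:
--                     romanLetter += roman_numeral_dict[int(num_str[i])]
--             ans.append(romanToInt(romanLetter))
--         return ans[0] + ans[1]
--
--     elif '*' in exp:
--         left, right = exp.split(" * ")
--         for num_str in [left, right]:
--             romanLetter = ""
--             for i in range(len(num_str)):
--                 if num_str[i:i+2] == "10":
--                     romanLetter += "X"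
--                     i += 1
--                 elif int(num_str[i]) in roman_numeral_dict:
--                     romanLetter += roman_numeral_dict[int(num_str[i])]
--             ans.append(romanToInt(romanLetter))
--         return ans[0] * ans[1]
-- ===== SOURCE B (Python) =====
-- def equation(exp):
--     def value(s):
--         # single left-to-right pass: fold each produced value (10 for "10", 1, 5)
--         # directly into the total with the subtractive rule; no roman-letter string.
--         total = 0
--         prev = 0
--         rest = list(s)
--         while rest:
--             if rest[0] == '1' and rest[1:2] == ['0']:
--                 v = 10
--                 rest = rest[2:]
--             elif rest[0] == '1':
--                 v = 1
--                 rest = rest[1:]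
--             elif rest[0] == '5':
--                 v = 5
--                 rest = rest[1:]
--             else:
--                 rest = rest[1:]
--                 continue
--             total += v - 2 * prev if v > prev else v
--             prev = v
--         return total
--
--     if '+' in exp:
--         left, right = exp.split(" + ")
--         return value(left) + value(right)
--     if '*' in exp:
--         left, right = exp.split(" * ")
--         return value(left) * value(right)
--     return None
-- ===== Notes on version B (the rewrite author's own statement) =====
-- stated objective: simpler
-- what changed: B drops the intermediate roman-letter string, both digit/letter dicts and the separate romanToInt pass: each operand is evaluated in one left-to-right scan that consumes a one-followed-by-zero digit pair as a single ten-valued token and folds every produced value straight into the total with the subtractive rule.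
import Mathlib
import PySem

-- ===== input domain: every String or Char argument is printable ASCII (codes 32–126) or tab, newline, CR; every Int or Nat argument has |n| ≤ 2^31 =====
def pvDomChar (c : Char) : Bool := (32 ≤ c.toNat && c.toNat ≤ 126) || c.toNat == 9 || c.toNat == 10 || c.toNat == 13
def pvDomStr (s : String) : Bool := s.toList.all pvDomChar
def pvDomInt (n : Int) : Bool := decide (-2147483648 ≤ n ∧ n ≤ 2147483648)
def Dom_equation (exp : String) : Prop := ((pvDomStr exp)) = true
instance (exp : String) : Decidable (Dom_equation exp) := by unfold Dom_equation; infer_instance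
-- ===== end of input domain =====

-- B replaces A's roman-letter string + second romanToInt pass by one direct scan per operand (objective: simpler).

-- ===== PORT A =====
-- roman_numeral_dict of romanToInt
def pvRomanDict : PySem.Dict Char Int :=
  PySem.Dict.ofList [('I', 1), ('V', 5), ('X', 10), ('L', 50), ('C', 100), ('D', 500), ('M', 1000)]

-- romanToInt(s): iterates the characters of s; the KeyError of roman_numeral_dict[letter] is
-- impossible at A's call sites (romanLetter contains only 'X','I','V'), so getD 0 is exact there.
def romanToInt (s : List Char) : Int :=
  (s.foldl (fun (st : Int × Int) letter =>
      let cv := PySem.Dict.getD pvRomanDict letter 0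
      (if cv > st.2 then st.1 + cv - 2 * st.2 else st.1 + cv, cv))
    (0, 0)).1

-- roman_numeral_dict of equation
def pvDigitDict : PySem.Dict Int Char := PySem.Dict.ofList [(1, 'I'), (5, 'V'), (10, 'X')]

-- loop body of "for i in range(len(num_str))"; int(num_str[i]) raising ValueError is excluded by Pre_
def pvBuildStep (s : List Char) (acc : List Char) (i : Int) : List Char :=
  if PySem.List.slice s (some i) (some (i + 2)) = ['1', '0'] then acc ++ ['X']
  else
    match PySem.Int.ofChars? [(PySem.List.pyGet? s i).getD ' '] with
    | some n =>
        if PySem.Dict.contains pvDigitDict n then acc ++ [PySem.Dict.getD pvDigitDict n ' ']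
        else acc
    | none => acc  -- ValueError in Python; Pre_ excludes

def pvBuildRoman (s : List Char) : List Char :=
  (PySem.List.pyRange 0 (s.length : Int) 1).foldl (pvBuildStep s) []

-- equation: "ans" of the two-element loop is written out as the two operand results.
-- The 'some [l, r]' arm is Python's successful unpack; any other split result raises (excluded by Pre_).
def equation (exp : String) : Option Int :=
  if PySem.Str.isIn "+" exp then
    match PySem.Str.split? exp " + " with
    | some [l, r] => some (romanToInt (pvBuildRoman l.toList) + romanToInt (pvBuildRoman r.toList))
    | none => none
    | some [] => none
    | some [_] => none
    | some (_ :: _ :: _ :: _) => none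
  else if PySem.Str.isIn "*" exp then
    match PySem.Str.split? exp " * " with
    | some [l, r] => some (romanToInt (pvBuildRoman l.toList) * romanToInt (pvBuildRoman r.toList))
    | none => none
    | some [] => none
    | some [_] => none
    | some (_ :: _ :: _ :: _) => none
  else none

-- ===== PORT B =====
-- value(s): the while loop consuming `rest`, one produced value folded in per step
def pvValue : List Char → Int → Int → Int
  | [], total, _ => total
  | '1' :: '0' :: rest, total, prev =>
      pvValue rest (if (10 : Int) > prev then total + 10 - 2 * prev else total + 10) 10
  | '1' :: rest, total, prev =>
      pvValue rest (if (1 : Int) > prev then total + 1 - 2 * prev else total + 1) 1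
  | '5' :: rest, total, prev =>
      pvValue rest (if (5 : Int) > prev then total + 5 - 2 * prev else total + 5) 5
  | _ :: rest, total, prev => pvValue rest total prev

-- 'left, right = exp.split(...)': some (left, right) exactly when the split has two parts; anything else raises (excluded by Pre_)
def pvUnpack2 (parts : Option (List String)) : Option (String × String) :=
  parts.bind (fun ps => if ps.length = 2 then some (ps.head!, ps.getLast!) else none)

def equation_alt (exp : String) : Option Int :=
  if PySem.Str.isIn "+" exp then
    (pvUnpack2 (PySem.Str.split? exp " + ")).map
      (fun lr => pvValue lr.1.toList 0 0 + pvValue lr.2.toList 0 0)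
  else if PySem.Str.isIn "*" exp then
    (pvUnpack2 (PySem.Str.split? exp " * ")).map
      (fun lr => pvValue lr.1.toList 0 0 * pvValue lr.2.toList 0 0)
  else none

-- ===== PRECONDITION & SPEC =====
-- Pre_ excludes exactly the inputs where the Python A raises: a '+'/'*' branch whose split
-- does not give two parts (unpack ValueError) or an operand with a non-digit character
-- (int(num_str[i]) ValueError).
def pvDigits (p : String) : Prop :=
  p.toList.all (fun c => c ∈ ['0', '1', '2', '3', '4', '5', '6', '7', '8', '9']) = true

def Pre_equation (exp : String) : Prop :=
  if PySem.Str.isIn "+" exp then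
    ((PySem.Str.split? exp " + ").getD []).length = 2 ∧
      ∀ p ∈ (PySem.Str.split? exp " + ").getD [], pvDigits p
  else if PySem.Str.isIn "*" exp then
    ((PySem.Str.split? exp " * ").getD []).length = 2 ∧
      ∀ p ∈ (PySem.Str.split? exp " * ").getD [], pvDigits p
  else True

instance (exp : String) : Decidable (Pre_equation exp) := by unfold Pre_equation pvDigits; infer_instance

def pvWitness_equation : String := "10 + 51"

def Spec_equation (exp : String) (out : Option Int) : Prop := out = equation_alt exp
instance (exp : String) (out : Option Int) : Decidable (Spec_equation exp out) := by unfold Spec_equation; infer_instance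

-- ===== CLAIM (what is proved, stated in full; the proofs are below) =====
def Claim_equal_equation : Prop := ∀ (exp : String), Dom_equation exp → Pre_equation exp → Spec_equation exp (equation exp)

-- ===== LEMMAS AND PROOFS =====

theorem pvBuildStep_shift (c : Char) (s : List Char) (acc : List Char) (k : ℕ) :
    pvBuildStep (c :: s) acc ((k : Int) + 1) = pvBuildStep s acc (k : Int) := by
  unfold pvBuildStep
  have h1 : PySem.List.slice (c :: s) (some ((k : Int) + 1)) (some ((k : Int) + 1 + 2))
      = PySem.List.slice s (some (k : Int)) (some ((k : Int) + 2)) := by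
    rw [PySem.List.slice_toNat (c :: s) (by omega) (by omega),
        PySem.List.slice_toNat s (by omega) (by omega)]
    have e1 : ((k : Int) + 1).toNat = k + 1 := by omega
    have e2 : ((k : Int) + 1 + 2).toNat = k + 3 := by omega
    have e3 : ((k : Int)).toNat = k := by omega
    have e4 : ((k : Int) + 2).toNat = k + 2 := by omega
    rw [e1, e2, e3, e4, List.drop_succ_cons]
    congr 1
    omega
  have h2 : PySem.List.pyGet? (c :: s) ((k : Int) + 1) = PySem.List.pyGet? s (k : Int) := by
    have h : ((k : Int) + 1) = ((k + 1 : ℕ) : Int) := by push_cast; ring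
    rw [h, PySem.List.pyGet?_natCast, PySem.List.pyGet?_natCast]
    simp
  rw [h1, h2]

def pvEmit (c : Char) (rest : List Char) : List Char :=
  if c = '1' ∧ rest.take 1 = ['0'] then ['X']
  else if c = '1' then ['I'] else if c = '5' then ['V'] else []

theorem pv_slice02 (x : Char) (s : List Char) :
    PySem.List.slice (x :: s) (some (0 : Int)) (some ((0 : Int) + 2)) = x :: s.take 1 := by
  rw [PySem.List.slice_toNat _ (by omega) (by omega)]
  norm_num [List.take_succ_cons]
  rfl

theorem pv_get0 (x : Char) (s : List Char) :
    PySem.List.pyGet? (x :: s) (0 : Int) = some x := by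
  have h : ((0 : ℕ) : Int) = (0 : Int) := rfl
  rw [← h, PySem.List.pyGet?_natCast]
  rfl

theorem pvBuildStep_zero (c : Char) (s : List Char) (acc : List Char)
    (hc : c ∈ ['0', '1', '2', '3', '4', '5', '6', '7', '8', '9']) :
    pvBuildStep (c :: s) acc 0 = acc ++ pvEmit c s := by
  fin_cases hc <;>
    · unfold pvBuildStep pvEmit
      rw [pv_slice02, pv_get0]
      by_cases h01 : s.take 1 = ['0'] <;> simp [h01] <;> rfl

def pvLetters : List Char → List Char
  | [] => []
  | c :: rest => pvEmit c rest ++ pvLetters rest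

theorem pvBuild_eq_letters (s : List Char)
    (hs : s.all (fun c => c ∈ ['0', '1', '2', '3', '4', '5', '6', '7', '8', '9']) = true) :
    ∀ acc, (PySem.List.pyRange 0 (s.length : Int) 1).foldl (pvBuildStep s) acc = acc ++ pvLetters s := by
  induction s with
  | nil => intro acc; simp [PySem.List.pyRange_one_eq_nil, pvLetters]
  | cons c s ih =>
    intro acc
    simp only [List.all_cons, Bool.and_eq_true] at hs
    have hn : ((c :: s).length : Int) = (s.length : Int) + 1 := by push_cast [List.length_cons]; ring
    rw [hn, PySem.List.pyRange_one_cons (by omega), List.foldl_cons]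
    norm_num
    have hshift : ∀ b : List Char,
        (PySem.List.pyRange 1 ((s.length : Int) + 1) 1).foldl (pvBuildStep (c :: s)) b
          = (PySem.List.pyRange 0 (s.length : Int) 1).foldl (pvBuildStep s) b := by
      intro b
      rw [PySem.List.pyRange_one 1 ((s.length : Int) + 1), PySem.List.pyRange_one 0 (s.length : Int)]
      have e1 : (((s.length : Int) + 1) - 1).toNat = s.length := by omega
      have e2 : ((s.length : Int) - 0).toNat = s.length := by omega
      rw [e1, e2, List.foldl_map, List.foldl_map]
      apply PySem.List.foldl_congr_mem
      intro acc' x hx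
      have h := pvBuildStep_shift c s acc' x
      have ea : (1 : Int) + (x : Int) = (x : Int) + 1 := by ring
      have eb : (0 : Int) + (x : Int) = (x : Int) := by ring
      rw [ea, eb, h]
    rw [hshift, pvBuildStep_zero c s acc (by simpa using hs.1), ih hs.2]
    simp [pvLetters]

theorem pvFold_letters (s : List Char) (total prev : Int) :
    ((pvLetters s).foldl (fun (st : Int × Int) letter =>
        let cv := PySem.Dict.getD pvRomanDict letter 0
        (if cv > st.2 then st.1 + cv - 2 * st.2 else st.1 + cv, cv)) (total, prev)).1
      = pvValue s total prev := by
  induction s, total, prev using pvValue.induct with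
  | case1 total prev => simp [pvLetters, pvValue]
  | case2 rest total prev ih =>
      simp only [pvLetters, pvEmit, pvValue, List.take_succ_cons, List.take_zero]
      norm_num
      rw [← ih]
      rfl
  | case3 rest total prev h ih =>
      have hne : rest.take 1 ≠ ['0'] := by
        cases rest with
        | nil => simp
        | cons a t =>
            simp only [List.take_succ_cons, List.take_zero]
            intro ha
            exact h t (by injection ha with h1 _; rw [h1])
      rw [pvValue.eq_3 total prev rest h]
      simp only [pvLetters, pvEmit]
      norm_num [hne]
      rw [← ih]
      rfl
  | case4 rest total prev ih =>
      rw [pvValue.eq_4]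
      simp only [pvLetters, pvEmit]
      norm_num
      rw [← ih]
      rfl
  | case5 c rest total prev h1 h2 h3 ih =>
      rw [pvValue.eq_5 total prev c rest h1 h2 h3]
      simp only [pvLetters, pvEmit]
      have hc1 : c ≠ '1' := fun hh => h2 hh
      have hc5 : c ≠ '5' := fun hh => h3 hh
      norm_num [hc1, hc5]
      exact ih

theorem pvOperand_eq (p : String) (hp : pvDigits p) :
    romanToInt (pvBuildRoman p.toList) = pvValue p.toList 0 0 := by
  unfold romanToInt pvBuildRoman
  rw [pvBuild_eq_letters p.toList hp []]
  simpa using pvFold_letters p.toList 0 0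

-- ===== VERDICT (by name: the statement is the Claim_ definition above) =====
theorem equation_spec : Claim_equal_equation := by
  unfold Claim_equal_equation Spec_equation
  intro exp _ hpre
  unfold Pre_equation at hpre
  unfold equation equation_alt
  by_cases hplus : PySem.Str.isIn "+" exp = true
  · simp only [hplus, if_true] at hpre ⊢
    cases hsp : PySem.Str.split? exp " + " with
    | none => rw [hsp] at hpre; simp at hpre
    | some parts =>
      rw [hsp] at hpre
      obtain ⟨hlen, hdig⟩ := hpre
      rcases parts with _ | ⟨l, _ | ⟨r, _ | ⟨x, t⟩⟩⟩
      · simp at hlen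
      · simp at hlen
      · have hl := hdig l (by simp)
        have hr := hdig r (by simp)
        simp [pvOperand_eq l hl, pvOperand_eq r hr]
        exact ⟨l, r, by rfl, rfl⟩
      · simp at hlen
  · simp only [Bool.not_eq_true] at hplus
    simp only [hplus, Bool.false_eq_true, if_false] at hpre ⊢
    by_cases hmul : PySem.Str.isIn "*" exp = true
    · simp only [hmul, if_true] at hpre ⊢
      cases hsp : PySem.Str.split? exp " * " with
      | none => rw [hsp] at hpre; simp at hpre
      | some parts =>
        rw [hsp] at hpre
        obtain ⟨hlen, hdig⟩ := hpre
        rcases parts with _ | ⟨l, _ | ⟨r, _ | ⟨x, t⟩⟩⟩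
        · simp at hlen
        · simp at hlen
        · have hl := hdig l (by simp)
          have hr := hdig r (by simp)
          simp [pvOperand_eq l hl, pvOperand_eq r hr]
          exact ⟨l, r, by rfl, rfl⟩
        · simp at hlen
    · simp only [Bool.not_eq_true] at hmul
      have hmul' : PySem.Chars.isIn ['*'] exp.toList = false := by simpa using hmul
      simp [hmul']
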